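-- pv_equiv track=rewrite | github.com/bigfrog10/python-data-structure-algo-tutorial | src/dsa/data_structure/array/max_sum_k_apart.py | max_sum_k_apart
-- ===== SOURCE A (Python) =====
-- def max_sum_k_apart(nums, k):
--     if not nums:
--         return 0
--
--     n = len(nums)
--     if n <= k:
--         return 0
--
--     emax = nums[0]
--     smax = nums[0] + nums[k]
--     for i in range(k, n):
--         emax = max(emax, nums[i-k])  # track partner's max
--         smax = max(smax, emax + nums[i])
--
--     return smax
-- ===== SOURCE B (Python) =====
-- def max_sum_k_apart(nums, k):
--     if not nums:
--         return 0
--     n = len(nums)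
--     if n <= k:
--         return 0
--     # prefix-maximum table: pm[i] = max(nums[0..i])
--     pm = []
--     cur = nums[0]
--     for x in nums:
--         cur = max(cur, x)
--         pm.append(cur)
--     return max(pm[i - k] + nums[i] for i in range(k, n))
-- ===== Notes on version B (the rewrite author's own statement) =====
-- stated objective: alternative
-- what changed: A's single fused scan that updates a running partner-max and the answer together is replaced by two separate passes: first build an explicit prefix-maximum table pm, then take max(pm[i-k]+nums[i]) over i in range(k,n).
import Mathlib
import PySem

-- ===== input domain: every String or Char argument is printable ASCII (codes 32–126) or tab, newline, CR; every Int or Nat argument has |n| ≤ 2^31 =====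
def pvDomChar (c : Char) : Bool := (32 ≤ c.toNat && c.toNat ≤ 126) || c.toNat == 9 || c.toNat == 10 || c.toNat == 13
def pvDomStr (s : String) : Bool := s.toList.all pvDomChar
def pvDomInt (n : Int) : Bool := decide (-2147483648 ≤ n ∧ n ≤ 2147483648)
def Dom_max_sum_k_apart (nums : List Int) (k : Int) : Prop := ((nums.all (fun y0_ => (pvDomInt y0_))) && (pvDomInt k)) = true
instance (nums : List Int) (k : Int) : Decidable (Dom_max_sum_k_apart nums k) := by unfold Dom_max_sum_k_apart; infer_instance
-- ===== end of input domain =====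

-- B replaces A's fused running-max scan by an explicit prefix-maximum table plus a
-- separate max-combining pass (objective: alternative decomposition, same cost).

-- ===== PORT A =====
-- literal port of A: fused loop carrying (emax, smax); out-of-range index → arbitrary 0 (excluded by Pre_)
def max_sum_k_apart (nums : List Int) (k : Int) : Int :=
  if nums = [] then 0
  else
    if (nums.length : Int) ≤ k then 0
    else
      (( PySem.List.pyRange k nums.length 1).foldl
          (fun (st : Int × Int) i =>
            (max st.1 (PySem.List.pyGetD nums (i - k) 0),
             max st.2 (max st.1 (PySem.List.pyGetD nums (i - k) 0) + PySem.List.pyGetD nums i 0)))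
          (PySem.List.pyGetD nums 0 0,
           PySem.List.pyGetD nums 0 0 + PySem.List.pyGetD nums k 0)).2

-- ===== PORT B =====
-- prefix-maximum table built by appending as in Source B, then a max-combining pass over range(k, n)
def max_sum_k_apart_alt (nums : List Int) (k : Int) : Int :=
  if nums = [] then 0
  else
    if (nums.length : Int) ≤ k then 0
    else
      let pm := (nums.foldl
        (fun (st : List Int × Int) x => (st.1 ++ [max st.2 x], max st.2 x))
        ([], PySem.List.pyGetD nums 0 0)).1
      -- Python max over the generator: first element as seed, fold max over the rest
      match PySem.List.pyRange k nums.length 1 with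
      | [] => 0
      | i0 :: rest =>
        rest.foldl
          (fun acc i => max acc (PySem.List.pyGetD pm (i - k) 0 + PySem.List.pyGetD nums i 0))
          (PySem.List.pyGetD pm (i0 - k) 0 + PySem.List.pyGetD nums i0 0)

-- ===== PRECONDITION & SPEC =====
-- Pre_ excludes nonempty nums with k < 0, where both A and B raise IndexError.
def Pre_max_sum_k_apart (nums : List Int) (k : Int) : Prop := nums = [] ∨ 0 ≤ k
instance (nums : List Int) (k : Int) : Decidable (Pre_max_sum_k_apart nums k) := by
  unfold Pre_max_sum_k_apart; infer_instance
def pvWitness_max_sum_k_apart : List Int × Int := ([3, -1, 4, 1, 5], 2)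

def Spec_max_sum_k_apart (nums : List Int) (k : Int) (out : Int) : Prop := out = max_sum_k_apart_alt nums k
instance (nums : List Int) (k : Int) (out : Int) : Decidable (Spec_max_sum_k_apart nums k out) := by unfold Spec_max_sum_k_apart; infer_instance

-- ===== CLAIM (what is proved, stated in full; the proofs are below) =====
def Claim_equal_max_sum_k_apart : Prop := ∀ (nums : List Int) (k : Int), Dom_max_sum_k_apart nums k → Pre_max_sum_k_apart nums k → Spec_max_sum_k_apart nums k (max_sum_k_apart nums k)

-- ===== LEMMAS AND PROOFS =====

-- scan-of-max: the list B's append loop builds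
def spm (c : Int) : List Int → List Int
  | [] => []
  | x :: xs => (max c x) :: spm (max c x) xs

theorem spm_length (c : Int) (l : List Int) : (spm c l).length = l.length := by
  induction l generalizing c with
  | nil => rfl
  | cons x xs ih => simp [spm, ih]

theorem foldl_append_spm (l : List Int) (acc : List Int) (c : Int) :
    (l.foldl (fun (st : List Int × Int) x => (st.1 ++ [max st.2 x], max st.2 x)) (acc, c)).1
      = acc ++ spm c l := by
  induction l generalizing acc c with
  | nil => simp [spm]
  | cons x xs ih => simp [List.foldl, spm, ih, List.append_assoc]

theorem spm_getD_succ (c : Int) (l : List Int) (j : Nat) (hj : j + 1 < l.length) :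
    (spm c l).getD (j + 1) 0 = max ((spm c l).getD j 0) (l.getD (j + 1) 0) := by
  induction l generalizing c j with
  | nil => simp at hj
  | cons x xs ih =>
    cases j with
    | zero =>
      cases xs with
      | nil => simp at hj
      | cons y ys => simp [spm, max_assoc]
    | succ j =>
      have := ih (max c x) j (by simpa using hj)
      simpa [spm] using this

-- Int-indexed pyGetD reduces to Nat getD on an in-range nonnegative index
theorem pyGetD_toNat (xs : List Int) (i : Int) (h0 : 0 ≤ i) :
    PySem.List.pyGetD xs i 0 = xs.getD i.toNat 0 := by
  have h : i = ((i.toNat : Nat) : Int) := by omega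
  conv_lhs => rw [h]
  rw [PySem.List.pyGetD_natCast]

-- A's fold vs the generic pref-max fold, for pm = spm nums[0] nums (0 ≤ k)
theorem fold_invariant (nums : List Int) (k : Int) (hk : 0 ≤ k)
    (pm : List Int) (hpm : pm = spm (nums.getD 0 0) nums) :
    ∀ (m : Nat) (i : Int), k ≤ i → (i + m = (nums.length : Int)) →
      ∀ s : Int,
        ((PySem.List.pyRange i nums.length 1).foldl
          (fun (st : Int × Int) j =>
            (max st.1 (PySem.List.pyGetD nums (j - k) 0),
             max st.2 (max st.1 (PySem.List.pyGetD nums (j - k) 0) + PySem.List.pyGetD nums j 0)))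
          (pm.getD (i - 1 - k).toNat 0, s)).2
        = (PySem.List.pyRange i nums.length 1).foldl
            (fun acc j => max acc (pm.getD (j - k).toNat 0 + PySem.List.pyGetD nums j 0)) s := by
  intro m
  induction m with
  | zero =>
    intro i hki hn s
    rw [PySem.List.pyRange_one_eq_nil (by omega)]
    simp
  | succ m ih =>
    intro i hki hn s
    have hin : i < (nums.length : Int) := by omega
    rw [PySem.List.pyRange_one_cons hin]
    simp only [List.foldl_cons]
    have hg : PySem.List.pyGetD nums (i - k) 0 = nums.getD (i - k).toNat 0 :=
      pyGetD_toNat nums (i - k) (by omega)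
    have hkey : max (pm.getD (i - 1 - k).toNat 0) (PySem.List.pyGetD nums (i - k) 0)
        = pm.getD (i - k).toNat 0 := by
      rw [hg, hpm]
      by_cases hik : i = k
      · have h0 : (i - 1 - k).toNat = 0 := by omega
        have h1 : (i - k).toNat = 0 := by omega
        rw [h0, h1]
        cases nums with
        | nil => exfalso; simp at hin; omega
        | cons y ys => simp [spm]
      · have hgt : k < i := lt_of_le_of_ne hki (fun h => hik h.symm)
        obtain ⟨j, hj⟩ : ∃ j : Nat, (i - k).toNat = j + 1 := ⟨(i-k).toNat - 1, by omega⟩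
        have h0 : (i - 1 - k).toNat = j := by omega
        rw [h0, hj]
        exact (spm_getD_succ (nums.getD 0 0) nums j (by omega)).symm
    rw [hkey]
    have hnext : (i + 1 - 1 - k).toNat = (i - k).toNat := by omega
    have := ih (i + 1) (by omega) (by omega)
      (max s (pm.getD (i - k).toNat 0 + PySem.List.pyGetD nums i 0))
    rw [hnext] at this
    simpa using this

-- ===== VERDICT (by name: the statement is the Claim_ definition above) =====
theorem max_sum_k_apart_spec : Claim_equal_max_sum_k_apart := by
  intro nums k _ hpre
  unfold Spec_max_sum_k_apart max_sum_k_apart max_sum_k_apart_alt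
  by_cases hnil : nums = []
  · simp [hnil]
  · rcases hpre with h | hk
    · exact absurd h hnil
    simp only [if_neg hnil]
    by_cases hnk : (nums.length : Int) ≤ k
    · simp [hnk]
    · simp only [if_neg hnk]
      have hkn : k < (nums.length : Int) := by omega
      have hpm :
          ((nums.foldl (fun (st : List Int × Int) x => (st.1 ++ [max st.2 x], max st.2 x))
            ([], PySem.List.pyGetD nums 0 0)).1)
          = spm (nums.getD 0 0) nums := by
        rw [foldl_append_spm]
        simp [PySem.List.pyGetD_zero]
      set pm := ((nums.foldl (fun (st : List Int × Int) x => (st.1 ++ [max st.2 x], max st.2 x))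
            ([], PySem.List.pyGetD nums 0 0)).1) with hpmdef
      have hlen : pm.length = nums.length := by rw [hpm, spm_length]
      rw [PySem.List.pyRange_one_cons hkn]
      simp only [List.foldl_cons]
      have hg0 : PySem.List.pyGetD nums 0 0 = nums.getD 0 0 := PySem.List.pyGetD_zero nums 0
      -- pm[0] = nums[0]
      have hpm0 : pm.getD 0 0 = PySem.List.pyGetD nums 0 0 := by
        rw [hpm, hg0]
        cases nums with
        | nil => exact absurd rfl hnil
        | cons y ys => simp [spm]
      have hkk0 : ((k:Int) - k) = ((0:Nat) : Int) := by omega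
      have hAe : max (PySem.List.pyGetD nums 0 0) (PySem.List.pyGetD nums (k - k) 0)
          = pm.getD ((k:Int) - k).toNat 0 := by
        rw [hkk0, PySem.List.pyGetD_natCast, Int.toNat_natCast, hpm0, hg0]
        simp
      have hAs : max (PySem.List.pyGetD nums 0 0 + PySem.List.pyGetD nums k 0)
            (max (PySem.List.pyGetD nums 0 0) (PySem.List.pyGetD nums (k - k) 0)
              + PySem.List.pyGetD nums k 0)
          = PySem.List.pyGetD nums 0 0 + PySem.List.pyGetD nums k 0 := by
        rw [hkk0, PySem.List.pyGetD_natCast]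
        rw [hg0]
        simp
      -- B's first term equals A's init smax
      have hBfirst : PySem.List.pyGetD pm (k - k) 0 = PySem.List.pyGetD nums 0 0 := by
        rw [hkk0, PySem.List.pyGetD_natCast, hpm0]
      rw [hAs, hAe, hBfirst]
      have hinv := fold_invariant nums k hk pm hpm ((nums.length : Int) - (k+1)).toNat (k+1)
        (by omega) (by omega)
        (PySem.List.pyGetD nums 0 0 + PySem.List.pyGetD nums k 0)
      have hsh : ((k:Int) + 1 - 1 - k).toNat = ((k:Int) - k).toNat := by omega
      rw [hsh] at hinv
      rw [hinv]
      refine PySem.List.foldl_congr_mem _ _ _ _ ?_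
      intro acc i hi
      have hmem := (PySem.List.mem_pyRange_one).1 hi
      rw [pyGetD_toNat pm (i - k) (by omega)]
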